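-- pv_equiv track=rewrite | github.com/1r0nw1ll/quantum-arithmetic-research | qa_alphageometry_ptolemy/qa_fibonacci_hypergraph_cert_v1/qa_fibonacci_hypergraph_cert_validate.py | compute_orbit_multiset_stats
-- ===== SOURCE A (Python) =====
-- def qa_mod(x, m):
--     """A1: result in {1,...,m}, never 0."""
--     return ((int(x) - 1) % m) + 1
--
-- def qa_step(b, e, m):
--     """T: (b,e) -> (e, (b+e) mod m), A1-adjusted."""
--     return (e, qa_mod(b + e, m))
--
-- def qa_hyperedge(b, e, m):
--     """Length-4 Fibonacci window hyperedge (b, e, d, a) for state (b,e).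
--
--     A2: d = b+e, a = b+2e derived (never assigned independently).
--     """
--     d = b + e
--     a = b + 2 * e
--     return (b, e, qa_mod(d, m), qa_mod(a, m))
--
-- def enumerate_state_space(m):
--     return [(b, e) for b in range(1, m + 1) for e in range(1, m + 1)]
--
-- def compute_orbit_multiset_stats(m):
--     """For each T-orbit of S_m, return (length, distinct_multisets)."""
--     seen_global = set()
--     results = []
--     for start in enumerate_state_space(m):
--         if start in seen_global:
--             continue
--         orbit = []
--         cur = start
--         cur_set = set()
--         while cur not in cur_set:
--             cur_set.add(cur)
--             orbit.append(cur)
--             cur = qa_step(cur[0], cur[1], m)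
--         seen_global.update(orbit)
--         multisets = set()
--         for b, e in orbit:
--             multisets.add(tuple(sorted(qa_hyperedge(b, e, m))))
--         results.append({"length": len(orbit), "distinct_multisets": len(multisets)})
--     return results
-- ===== SOURCE B (Python) =====
-- def compute_orbit_multiset_stats(m):
--     """For each T-orbit of S_m, return (length, distinct_multisets).
--
--     Union-find (weighted quick-find) instead of orbit walking: every state is
--     unioned with its successor under T, so the components of the resulting
--     partition are exactly the T-orbits; states are then grouped by their final
--     label in scan order and each group is summarised.
--     """
--     n = m * m if m > 0 else 0
--     label = list(range(n))
--     members = [[i] for i in range(n)]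
--     for b in range(1, m + 1):
--         for e in range(1, m + 1):
--             i = (b - 1) * m + (e - 1)
--             j = (e - 1) * m + (b + e - 1) % m
--             li, lj = label[i], label[j]
--             if li != lj:
--                 mi, mj = members[li], members[lj]
--                 if len(mi) < len(mj):
--                     li, lj, mi, mj = lj, li, mj, mi
--                 for k in mj:
--                     label[k] = li
--                 members[li] = mi + mj
--                 members[lj] = []
--     groups = {}
--     for b in range(1, m + 1):
--         for e in range(1, m + 1):
--             groups.setdefault(label[(b - 1) * m + (e - 1)], []).append((b, e))
--     results = []
--     for group in groups.values():
--         edges = set()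
--         for (b, e) in group:
--             edges.add(tuple(sorted((b, e, (b + e - 1) % m + 1, (b + 2 * e - 1) % m + 1))))
--         results.append({"length": len(group), "distinct_multisets": len(edges)})
--     return results
-- ===== Notes on version B (the rewrite author's own statement) =====
-- stated objective: alternative
-- what changed: A discovers each orbit by walking the trajectory from every unvisited start with a per-orbit seen set; B never walks an orbit: it builds a weighted quick-find union-find over all m^2 states, unioning each state with its single successor under T (components = orbits since T is a bijection), then groups states by final label in scan order and summarises each group.
import Mathlib
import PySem

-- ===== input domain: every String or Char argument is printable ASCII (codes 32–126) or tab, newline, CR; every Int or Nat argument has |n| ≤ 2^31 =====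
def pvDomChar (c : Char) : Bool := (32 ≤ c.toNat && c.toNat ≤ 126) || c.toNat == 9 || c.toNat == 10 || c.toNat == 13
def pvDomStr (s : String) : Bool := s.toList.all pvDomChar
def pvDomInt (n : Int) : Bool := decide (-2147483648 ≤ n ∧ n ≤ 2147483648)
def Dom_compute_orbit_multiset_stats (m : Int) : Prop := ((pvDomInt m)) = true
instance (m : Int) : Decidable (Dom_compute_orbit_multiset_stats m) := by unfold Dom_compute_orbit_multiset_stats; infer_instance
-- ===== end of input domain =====

-- B replaces A's orbit walking by a weighted quick-find union-find: every state is unioned with its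
-- successor under the step map (a bijection, so components = orbits), then states are grouped by their
-- final label in scan order and each group is summarised (alternative algorithm, similar cost).

-- ===== PORT A =====
def qa_mod (x m : Int) : Int := PySem.Int.mod (x - 1) m + 1

def qa_step (b e m : Int) : Int × Int := (e, qa_mod (b + e) m)

def qa_hyperedge (b e m : Int) : Int × Int × Int × Int :=
  let d := b + e
  let a := b + 2 * e
  (b, e, qa_mod d m, qa_mod a m)

def enumerate_state_space (m : Int) : List (Int × Int) :=
  (PySem.List.pyRange 1 (m + 1) 1).flatMap (fun b => (PySem.List.pyRange 1 (m + 1) 1).map (fun e => (b, e)))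

-- tuple(sorted(qa_hyperedge(b, e, m))), kept as its sorted 4-element list
def pvSortedEdge (b e m : Int) : List Int :=
  match qa_hyperedge b e m with
  | (h1, h2, h3, h4) => PySem.List.sorted [h1, h2, h3, h4] (fun x => x) false

-- A's 'while cur not in cur_set' loop; fuel m^2+1 always suffices (cur_set grows each step within the m^2 states)
def pvOrbitLoop (m : Int) : Nat → Int × Int → PySem.Set (Int × Int) → List (Int × Int) → List (Int × Int)
  | 0, _, _, orbit => orbit
  | fuel + 1, cur, curSet, orbit =>
    if PySem.Set.contains curSet cur then orbit
    else pvOrbitLoop m fuel (qa_step cur.1 cur.2 m) (PySem.Set.add curSet cur) (orbit ++ [cur])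

-- the body of A's 'for start in enumerate_state_space(m)' loop
def pvBodyA (m : Int) (st : PySem.Set (Int × Int) × List (List (String × Int))) (start : Int × Int) :
    PySem.Set (Int × Int) × List (List (String × Int)) :=
  if PySem.Set.contains st.1 start then st
  else
    let orbit := pvOrbitLoop m (m.toNat * m.toNat + 1) start PySem.Set.empty []
    let seen := PySem.Set.update st.1 orbit
    let multisets := orbit.foldl (fun ms p => PySem.Set.add ms (pvSortedEdge p.1 p.2 m)) PySem.Set.empty
    (seen, st.2 ++ [[("length", (orbit.length : Int)), ("distinct_multisets", PySem.Set.len multisets)]])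

def compute_orbit_multiset_stats (m : Int) : List (List (String × Int)) :=
  ((enumerate_state_space m).foldl (pvBodyA m) (PySem.Set.empty, [])).2

-- ===== PORT B =====
-- Source B's 'states' comprehension
def pvStatesB (m : Int) : List (Int × Int) :=
  (PySem.List.pyRange 1 (m + 1) 1).flatMap (fun b => (PySem.List.pyRange 1 (m + 1) 1).map (fun e => (b, e)))

-- n = m * m if m > 0 else 0; label = list(range(n))
def pvInitLabel (m : Int) : List Int :=
  PySem.List.pyRange 0 (if 0 < m then m * m else 0) 1

-- members = [[i] for i in range(n)]
def pvInitMembers (m : Int) : List (List Int) :=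
  (PySem.List.pyRange 0 (if 0 < m then m * m else 0) 1).map (fun i => [i])

-- the body of Source B's union loop; every index read is in range for the states the
-- loop visits, so the totalised pyGetD defaults are unreachable
def pvUnionStep (m : Int) (st : List Int × List (List Int)) (s : Int × Int) :
    List Int × List (List Int) :=
  let i := (s.1 - 1) * m + (s.2 - 1)
  let j := (s.2 - 1) * m + PySem.Int.mod (s.1 + s.2 - 1) m
  let li := PySem.List.pyGetD st.1 i 0
  let lj := PySem.List.pyGetD st.1 j 0
  if li = lj then st
  else
    let mi := PySem.List.pyGetD st.2 li []
    let mj := PySem.List.pyGetD st.2 lj []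
    -- 'li, lj, mi, mj = lj, li, mj, mi' when the li-class is the smaller
    let p := if PySem.List.len mi < PySem.List.len mj then ((lj, li), (mj, mi)) else ((li, lj), (mi, mj))
    let label := p.2.2.foldl (fun l k => PySem.List.pySetD l k p.1.1) st.1
    let members := PySem.List.pySetD (PySem.List.pySetD st.2 p.1.1 (p.2.1 ++ p.2.2)) p.1.2 []
    (label, members)

def pvPhase1 (m : Int) : List Int × List (List Int) :=
  (pvStatesB m).foldl (pvUnionStep m) (pvInitLabel m, pvInitMembers m)

-- groups.setdefault(label[(b-1)*m+(e-1)], []).append((b, e))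
def pvGroups (m : Int) : PySem.Dict Int (List (Int × Int)) :=
  let label := (pvPhase1 m).1
  (pvStatesB m).foldl
    (fun g s => g.modify (PySem.List.pyGetD label ((s.1 - 1) * m + (s.2 - 1)) 0) [] (· ++ [s]))
    PySem.Dict.empty

def compute_orbit_multiset_stats_alt (m : Int) : List (List (String × Int)) :=
  (PySem.Dict.values (pvGroups m)).foldl
    (fun res g =>
      let edges := g.foldl (fun es p =>
        PySem.Set.add es (PySem.List.sorted
          [p.1, p.2, PySem.Int.mod (p.1 + p.2 - 1) m + 1, PySem.Int.mod (p.1 + 2 * p.2 - 1) m + 1]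
          (fun x => x) false)) PySem.Set.empty
      res ++ [[("length", PySem.List.len g), ("distinct_multisets", PySem.Set.len edges)]]) []

-- ===== PRECONDITION & SPEC =====
def Spec_compute_orbit_multiset_stats (m : Int) (out : List (List (String × Int))) : Prop := out = compute_orbit_multiset_stats_alt m
instance (m : Int) (out : List (List (String × Int))) : Decidable (Spec_compute_orbit_multiset_stats m out) := by unfold Spec_compute_orbit_multiset_stats; infer_instance

-- ===== CLAIM (what is proved, stated in full; the proofs are below) =====
def Claim_equal_compute_orbit_multiset_stats : Prop := ∀ (m : Int), Dom_compute_orbit_multiset_stats m → Spec_compute_orbit_multiset_stats m (compute_orbit_multiset_stats m)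

-- ===== LEMMAS AND PROOFS =====

-- the state space {1..m} × {1..m}
def pvInS (m : Int) (p : Int × Int) : Prop := 1 ≤ p.1 ∧ p.1 ≤ m ∧ 1 ≤ p.2 ∧ p.2 ≤ m

-- the T-trajectory from s
def pvTraj (m : Int) (s : Int × Int) : Nat → Int × Int
  | 0 => s
  | n + 1 => qa_step (pvTraj m s n).1 (pvTraj m s n).2 m

-- the first i trajectory points, in order
def pvTl (m : Int) (s : Int × Int) (i : Nat) : List (Int × Int) := (List.range i).map (pvTraj m s)

lemma pv_qa_mod_bounds {m : Int} (hm : 1 ≤ m) (x : Int) : 1 ≤ qa_mod x m ∧ qa_mod x m ≤ m := by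
  unfold qa_mod
  have h1 := PySem.Int.mod_nonneg (x - 1) (by omega : (0:Int) < m)
  have h2 := PySem.Int.mod_lt (x - 1) (by omega : (0:Int) < m)
  omega

lemma pv_step_inS {m : Int} (hm : 1 ≤ m) {p : Int × Int} (hp : pvInS m p) :
    pvInS m (qa_step p.1 p.2 m) := by
  obtain ⟨h1, h2, h3, h4⟩ := hp
  have := pv_qa_mod_bounds hm (p.1 + p.2)
  exact ⟨h3, h4, this.1, this.2⟩

lemma pv_step_inj {m : Int} (hm : 1 ≤ m) {p q : Int × Int} (hp : pvInS m p) (hq : pvInS m q)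
    (h : qa_step p.1 p.2 m = qa_step q.1 q.2 m) : p = q := by
  obtain ⟨pb, pe⟩ := p
  obtain ⟨qb, qe⟩ := q
  obtain ⟨hp1, hp2, hp3, hp4⟩ := hp
  obtain ⟨hq1, hq2, hq3, hq4⟩ := hq
  simp only [qa_step, Prod.mk.injEq] at h
  obtain ⟨he, hmod⟩ := h
  subst he
  unfold qa_mod at hmod
  rw [PySem.Int.mod_eq_emod_of_pos (by omega), PySem.Int.mod_eq_emod_of_pos (by omega)] at hmod
  have hmod' : (pb + pe - 1) % m = (qb + pe - 1) % m := by omega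
  have hdvd : m ∣ (qb + pe - 1) - (pb + pe - 1) := Int.ModEq.dvd hmod'
  have heq : (qb + pe - 1) - (pb + pe - 1) = qb - pb := by ring
  rw [heq] at hdvd
  have := Int.eq_zero_of_abs_lt_dvd hdvd (by rw [abs_lt]; omega)
  exact Prod.ext (by simp; omega) rfl

lemma pv_traj_inS {m : Int} {s : Int × Int} (hm : 1 ≤ m) (hs : pvInS m s) (i : Nat) :
    pvInS m (pvTraj m s i) := by
  induction i with
  | zero => exact hs
  | succ n ih => exact pv_step_inS hm ih

lemma pv_traj_add (m : Int) (s : Int × Int) (a b : Nat) :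
    pvTraj m s (a + b) = pvTraj m (pvTraj m s a) b := by
  induction b with
  | zero => rfl
  | succ n ih => rw [← Nat.add_assoc]; simp only [pvTraj, ih]

lemma pv_back {m : Int} {s : Int × Int} (hm : 1 ≤ m) (hs : pvInS m s) :
    ∀ j i, j ≤ i → pvTraj m s j = pvTraj m s i → s = pvTraj m s (i - j) := by
  intro j
  induction j with
  | zero => intro i _ h; simpa [pvTraj] using h
  | succ n ih =>
    intro i hle h
    obtain ⟨i', rfl⟩ : ∃ i', i = i' + 1 := ⟨i - 1, by omega⟩
    have hstep : qa_step (pvTraj m s n).1 (pvTraj m s n).2 m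
        = qa_step (pvTraj m s i').1 (pvTraj m s i').2 m := h
    have heq := pv_step_inj hm (pv_traj_inS hm hs n) (pv_traj_inS hm hs i') hstep
    have := ih i' (by omega) heq
    simpa [Nat.succ_sub_succ] using this

lemma pv_mem_states {m : Int} {p : Int × Int} :
    p ∈ pvStatesB m ↔ pvInS m p := by
  unfold pvStatesB
  simp only [List.mem_flatMap, List.mem_map]
  constructor
  · rintro ⟨b, hb, e, he, rfl⟩
    rw [PySem.List.mem_pyRange_one] at hb he
    exact ⟨hb.1, by omega, he.1, by omega⟩
  · rintro ⟨h1, h2, h3, h4⟩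
    exact ⟨p.1, by rw [PySem.List.mem_pyRange_one]; omega,
           p.2, by rw [PySem.List.mem_pyRange_one]; omega, rfl⟩

lemma pv_states_eq (m : Int) : enumerate_state_space m = pvStatesB m := rfl

lemma pv_states_inS {m : Int} {p : Int × Int} (hp : p ∈ pvStatesB m) : 1 ≤ m ∧ pvInS m p := by
  have h := pv_mem_states.1 hp
  exact ⟨by rcases h with ⟨a, b, c, d⟩; omega, h⟩

lemma pv_states_length (m : Int) : (pvStatesB m).length = m.toNat * m.toNat := by
  unfold pvStatesB
  rw [List.length_flatMap]
  have h1 : ∀ b : Int, ((PySem.List.pyRange 1 (m + 1) 1).map (fun e => (b, e))).length = m.toNat := by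
    intro b
    rw [List.length_map, PySem.List.length_pyRange_one]
    omega
  have h2 : (List.map (fun b => ((PySem.List.pyRange 1 (m + 1) 1).map (fun e => (b, e))).length)
      (PySem.List.pyRange 1 (m + 1) 1)) = List.replicate m.toNat m.toNat := by
    rw [show (PySem.List.pyRange 1 (m+1) 1).map
          (fun b => ((PySem.List.pyRange 1 (m + 1) 1).map (fun e => (b, e))).length)
        = (PySem.List.pyRange 1 (m+1) 1).map (fun _ => m.toNat) from List.map_congr_left (fun b _ => h1 b)]
    rw [List.map_const', PySem.List.length_pyRange_one]
    congr 1
    omega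
  rw [h2, List.sum_replicate, smul_eq_mul]

lemma pv_states_nodup (m : Int) : (pvStatesB m).Nodup := by
  unfold pvStatesB
  rw [List.nodup_flatMap]
  constructor
  · intro b _
    exact (PySem.List.nodup_pyRange_one 1 (m+1)).map
      (fun e e' h => by simpa using (Prod.mk.injEq .. ▸ h :))
  · refine (PySem.List.nodup_pyRange_one 1 (m+1)).imp ?_
    intro b b' hne
    simp only [Function.onFun, List.disjoint_left, List.mem_map]
    rintro x ⟨e, _, rfl⟩ ⟨e', _, h⟩
    exact hne (congrArg Prod.fst h).symm


-- pigeonhole: the trajectory returns to its start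
lemma pv_period_exists {m : Int} {s : Int × Int} (hm : 1 ≤ m) (hs : pvInS m s) :
    ∃ p, 0 < p ∧ pvTraj m s p = s := by
  classical
  set n := (pvStatesB m).length with hn
  have hmaps : ∀ k ∈ Finset.range (n + 1), pvTraj m s k ∈ (pvStatesB m).toFinset := by
    intro k _
    rw [List.mem_toFinset, pv_mem_states]
    exact pv_traj_inS hm hs k
  have hcard : ((pvStatesB m).toFinset).card < (Finset.range (n + 1)).card := by
    rw [Finset.card_range]
    exact Nat.lt_succ_of_le (List.toFinset_card_le _)
  obtain ⟨x, hx, y, hy, hne, hfe⟩ :=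
    Finset.exists_ne_map_eq_of_card_lt_of_maps_to hcard hmaps
  rcases Nat.lt_or_ge x y with h | h
  · have := pv_back hm hs x y (by omega) hfe
    exact ⟨y - x, by omega, this.symm⟩
  · have := pv_back hm hs y x (by omega) hfe.symm
    exact ⟨x - y, by omega, this.symm⟩

lemma pv_traj_mul {m : Int} {s : Int × Int} {p : Nat} (hp : pvTraj m s p = s) (k : Nat) :
    pvTraj m s (k * p) = s := by
  induction k with
  | zero => simp [pvTraj]
  | succ t ih => rw [Nat.succ_mul, pv_traj_add, ih, hp]

-- same T-orbit
def pvSO (m : Int) (s t : Int × Int) : Prop := ∃ k, pvTraj m s k = t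

lemma pv_so_refl (m : Int) (s : Int × Int) : pvSO m s s := ⟨0, rfl⟩

lemma pv_so_trans {m : Int} {s t u : Int × Int} (h1 : pvSO m s t) (h2 : pvSO m t u) : pvSO m s u := by
  obtain ⟨a, ha⟩ := h1
  obtain ⟨b, hb⟩ := h2
  exact ⟨a + b, by rw [pv_traj_add, ha, hb]⟩

lemma pv_so_symm {m : Int} {s t : Int × Int} (hm : 1 ≤ m) (hs : pvInS m s) (h : pvSO m s t) :
    pvSO m t s := by
  obtain ⟨k, hk⟩ := h
  obtain ⟨p, hp0, hp⟩ := pv_period_exists hm hs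
  refine ⟨(k + 1) * p - k, ?_⟩
  have hle : k ≤ (k + 1) * p := by nlinarith
  rw [← hk, ← pv_traj_add, Nat.add_sub_cancel' hle, pv_traj_mul hp]

-- bounded representation: any orbit element is reached before the period
lemma pv_so_bounded {m : Int} {s t : Int × Int} (h : ∃ p, 0 < p ∧ pvTraj m s p = s)
    (hso : pvSO m s t) : ∃ k < Nat.find h, pvTraj m s k = t := by
  obtain ⟨k, hk⟩ := hso
  obtain ⟨hP0, hPs⟩ := Nat.find_spec h
  set P := Nat.find h
  refine ⟨k % P, Nat.mod_lt _ hP0, ?_⟩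
  conv_rhs => rw [← hk]
  conv_rhs => rw [show k = P * (k / P) + k % P from (Nat.div_add_mod k P).symm]
  rw [pv_traj_add, Nat.mul_comm, pv_traj_mul hPs]

-- the orbit as the first P trajectory points
lemma pv_orbitL_nodup {m : Int} {s : Int × Int} (hm : 1 ≤ m) (hs : pvInS m s)
    (h : ∃ p, 0 < p ∧ pvTraj m s p = s) : (pvTl m s (Nat.find h)).Nodup := by
  rw [pvTl, List.nodup_map_iff_inj_on (List.nodup_range)]
  intro a ha b hb hab
  simp only [List.mem_range] at ha hb
  by_contra hne
  rcases Nat.lt_or_ge a b with hlt | hge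
  · have := pv_back hm hs a b (by omega) hab
    exact absurd this.symm (Nat.find_min h (m := b - a) (by omega) |> fun hmin heq => hmin ⟨by omega, heq⟩)
  · have hlt : b < a := by omega
    have := pv_back hm hs b a (by omega) hab.symm
    exact absurd this.symm (fun heq => Nat.find_min h (m := a - b) (by omega) ⟨by omega, heq⟩)

lemma pv_mem_orbitL {m : Int} {s t : Int × Int}
    (h : ∃ p, 0 < p ∧ pvTraj m s p = s) :
    t ∈ pvTl m s (Nat.find h) ↔ pvSO m s t := by
  rw [pvTl]
  simp only [List.mem_map, List.mem_range]
  constructor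
  · rintro ⟨k, _, rfl⟩; exact ⟨k, rfl⟩
  · intro hso
    obtain ⟨k, hk, he⟩ := pv_so_bounded h hso
    exact ⟨k, hk, he⟩

lemma pv_orbitL_length {m : Int} {s : Int × Int}
    (h : ∃ p, 0 < p ∧ pvTraj m s p = s) : (pvTl m s (Nat.find h)).length = Nat.find h := by
  rw [pvTl, List.length_map, List.length_range]

lemma pv_P_le {m : Int} {s : Int × Int} (hm : 1 ≤ m) (hs : pvInS m s)
    (h : ∃ p, 0 < p ∧ pvTraj m s p = s) : Nat.find h ≤ m.toNat * m.toNat := by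
  classical
  have hnd := pv_orbitL_nodup hm hs h
  have hsub : (pvTl m s (Nat.find h)).toFinset ⊆ (pvStatesB m).toFinset := by
    intro x hx
    rw [List.mem_toFinset] at hx ⊢
    rw [pvTl] at hx
    simp only [List.mem_map, List.mem_range] at hx
    obtain ⟨k, _, rfl⟩ := hx
    exact pv_mem_states.2 (pv_traj_inS hm hs k)
  calc Nat.find h = (pvTl m s (Nat.find h)).length := (pv_orbitL_length h).symm
    _ = (pvTl m s (Nat.find h)).toFinset.card := (List.toFinset_card_of_nodup hnd).symm
    _ ≤ (pvStatesB m).toFinset.card := Finset.card_le_card hsub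
    _ ≤ (pvStatesB m).length := List.toFinset_card_le _
    _ = m.toNat * m.toNat := pv_states_length m


-- A's per-start orbit walk, as a total function
def pvOrbitA (m : Int) (s : Int × Int) : List (Int × Int) :=
  pvOrbitLoop m (m.toNat * m.toNat + 1) s PySem.Set.empty []

def pvEntryA (m : Int) (s : Int × Int) : List (String × Int) :=
  [("length", ((pvOrbitA m s).length : Int)),
   ("distinct_multisets", PySem.Set.len ((pvOrbitA m s).foldl
     (fun ms p => PySem.Set.add ms (pvSortedEdge p.1 p.2 m)) PySem.Set.empty))]

lemma pv_contains_false {s : PySem.Set (Int × Int)} {x : Int × Int} (h : x ∉ s) :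
    PySem.Set.contains s x = false := by
  rw [Bool.eq_false_iff]
  intro hc
  exact h ((PySem.Set.contains_iff s x).1 hc)

lemma pv_tl_succ (m : Int) (s : Int × Int) (i : Nat) :
    pvTl m s (i + 1) = pvTl m s i ++ [pvTraj m s i] := by
  simp [pvTl, List.range_succ]

lemma pv_not_mem_tl {m : Int} {s : Int × Int} (hm : 1 ≤ m) (hs : pvInS m s)
    (h : ∃ p, 0 < p ∧ pvTraj m s p = s) {i : Nat} (hi : i < Nat.find h) :
    pvTraj m s i ∉ pvTl m s i := by
  intro hmem
  rw [pvTl] at hmem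
  simp only [List.mem_map, List.mem_range] at hmem
  obtain ⟨j, hj, hje⟩ := hmem
  have := pv_back hm hs j i (by omega) hje
  exact Nat.find_min h (m := i - j) (by omega) ⟨by omega, this.symm⟩

lemma pv_loopA {m : Int} {s : Int × Int} (hm : 1 ≤ m) (hs : pvInS m s)
    (h : ∃ p, 0 < p ∧ pvTraj m s p = s) :
    ∀ f i, i ≤ Nat.find h → Nat.find h < i + f →
    pvOrbitLoop m f (pvTraj m s i) (pvTl m s i) (pvTl m s i) = pvTl m s (Nat.find h) := by
  intro f
  induction f with
  | zero => intro i h1 h2; omega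
  | succ f ih =>
    intro i h1 h2
    rcases Nat.lt_or_ge i (Nat.find h) with hlt | hge
    · have hnot := pv_not_mem_tl hm hs h hlt
      rw [pvOrbitLoop, pv_contains_false hnot, if_neg (by simp)]
      rw [show qa_step (pvTraj m s i).1 (pvTraj m s i).2 m = pvTraj m s (i + 1) from rfl,
        PySem.Set.add_of_not_mem hnot, ← pv_tl_succ]
      exact ih (i + 1) (by omega) (by omega)
    · have hieq : i = Nat.find h := by omega
      have hPs : pvTraj m s i = s := by rw [hieq]; exact (Nat.find_spec h).2
      have hmem : pvTraj m s i ∈ pvTl m s i := by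
        rw [hPs, pvTl]
        simp only [List.mem_map, List.mem_range]
        exact ⟨0, by have := (Nat.find_spec h).1; omega, rfl⟩
      rw [pvOrbitLoop, (PySem.Set.contains_iff _ _).2 hmem, if_pos rfl, hieq]

lemma pv_orbitA_eq {m : Int} {s : Int × Int} (hm : 1 ≤ m) (hs : pvInS m s)
    (h : ∃ p, 0 < p ∧ pvTraj m s p = s) : pvOrbitA m s = pvTl m s (Nat.find h) := by
  have := pv_loopA hm hs h (m.toNat * m.toNat + 1) 0 (by omega)
    (by have := pv_P_le hm hs h; omega)
  simpa [pvTl, pvOrbitA, pvTraj] using this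

lemma pv_mem_orbitA {m : Int} {s : Int × Int} (hm : 1 ≤ m) (hs : pvInS m s) (t : Int × Int) :
    t ∈ pvOrbitA m s ↔ pvSO m s t := by
  have h := pv_period_exists hm hs
  rw [pv_orbitA_eq hm hs h, pv_mem_orbitL h]

lemma pv_orbitA_nodup {m : Int} {s : Int × Int} (hm : 1 ≤ m) (hs : pvInS m s) :
    (pvOrbitA m s).Nodup := by
  have h := pv_period_exists hm hs
  rw [pv_orbitA_eq hm hs h]
  exact pv_orbitL_nodup hm hs h

-- first-appearance representatives of the classes of `key`, in scan order
def pvFirstsBy (key : Int × Int → Int) :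
    List Int → List (Int × Int) → List (Int × Int)
  | _, [] => []
  | seen, s :: r =>
    if key s ∈ seen then pvFirstsBy key (seen ++ [key s]) r
    else s :: pvFirstsBy key (seen ++ [key s]) r

lemma pv_firstsBy_append (key : Int × Int → Int) :
    ∀ (l : List (Int × Int)) (seen : List Int) (a : Int × Int),
    pvFirstsBy key seen (l ++ [a])
      = pvFirstsBy key seen l ++ (if key a ∈ seen ++ l.map key then [] else [a]) := by
  intro l
  induction l with
  | nil => intro seen a; simp [pvFirstsBy]
  | cons x xs ih =>
    intro seen a
    simp only [List.cons_append, pvFirstsBy, List.map_cons]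
    by_cases hx : key x ∈ seen
    · rw [if_pos hx, if_pos hx, ih, List.append_assoc]
      rfl
    · rw [if_neg hx, if_neg hx, ih, List.append_assoc]
      rfl

lemma pv_bodyA_eq (m : Int) (st : PySem.Set (Int × Int) × List (List (String × Int)))
    (a : Int × Int) :
    pvBodyA m st a
      = if PySem.Set.contains st.1 a then st
        else (PySem.Set.update st.1 (pvOrbitA m a), st.2 ++ [pvEntryA m a]) := rfl

-- fold invariant driver: an invariant indexed by the processed prefix
lemma pv_foldl_pre {α β : Type} (full : List α) (body : β → α → β) (P : List α → β → Prop)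
    (step : ∀ pre a rest st, full = pre ++ a :: rest → P pre st → P (pre ++ [a]) (body st a)) :
    ∀ (rest pre : List α) (st : β), full = pre ++ rest → P pre st →
      P full (rest.foldl body st) := by
  intro rest
  induction rest with
  | nil =>
    intro pre st h hp
    rw [List.append_nil] at h
    subst h
    exact hp
  | cons a r ih =>
    intro pre st h hp
    rw [List.foldl_cons]
    exact ih (pre ++ [a]) (body st a) (by rw [h, List.append_assoc]; rfl)
      (step pre a r st h hp)

-- A's whole fold, characterised through any key function that classifies the orbits
lemma pv_A_eq {m : Int} (hm : 1 ≤ m) (key : Int × Int → Int)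
    (hkey : ∀ x ∈ pvStatesB m, ∀ y ∈ pvStatesB m, (key x = key y ↔ pvSO m x y)) :
    compute_orbit_multiset_stats m
      = (pvFirstsBy key [] (pvStatesB m)).map (pvEntryA m) := by
  have main := pv_foldl_pre (pvStatesB m) (pvBodyA m)
    (fun pre st => (∀ t, t ∈ st.1 ↔ ∃ u ∈ pre, pvSO m u t)
      ∧ st.2 = (pvFirstsBy key [] pre).map (pvEntryA m))
    ?_ (pvStatesB m) [] (PySem.Set.empty, [])
    rfl (by constructor <;> simp [pvFirstsBy])
  · unfold compute_orbit_multiset_stats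
    rw [pv_states_eq]
    exact main.2
  · rintro pre a rest st hfull ⟨hseen, hres⟩
    have ha : a ∈ pvStatesB m := by rw [hfull]; simp
    have hpre : ∀ u ∈ pre, u ∈ pvStatesB m := by
      intro u hu; rw [hfull]; simp [hu]
    have haS := (pv_states_inS ha).2
    have hcov : (∃ u ∈ pre, pvSO m u a) ↔ key a ∈ [] ++ pre.map key := by
      simp only [List.nil_append, List.mem_map]
      constructor
      · rintro ⟨u, hu, hso⟩
        exact ⟨u, hu, (hkey u (hpre u hu) a ha).2 hso⟩
      · rintro ⟨u, hu, hk⟩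
        exact ⟨u, hu, (hkey u (hpre u hu) a ha).1 hk⟩
    have hfb := pv_firstsBy_append key pre [] a
    rw [pv_bodyA_eq]
    by_cases hin : PySem.Set.contains st.1 a = true
    · rw [if_pos hin]
      have hcova : ∃ u ∈ pre, pvSO m u a := (hseen a).1 ((PySem.Set.contains_iff _ _).1 hin)
      constructor
      · intro t
        rw [hseen t]
        constructor
        · rintro ⟨u, hu, hso⟩; exact ⟨u, by simp [hu], hso⟩
        · rintro ⟨u, hu, hso⟩
          rcases (List.mem_append.1 hu) with h | h
          · exact ⟨u, h, hso⟩
          · obtain ⟨u0, hu0, hso0⟩ := hcova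
            have : u = a := by simpa using h
            subst this
            exact ⟨u0, hu0, pv_so_trans hso0 hso⟩
      · rw [hres, hfb, if_pos (hcov.1 hcova)]
        simp
    · rw [if_neg hin]
      have hncov : ¬ ∃ u ∈ pre, pvSO m u a := by
        intro hc; exact absurd ((PySem.Set.contains_iff _ _).2 ((hseen a).2 hc)) (by simpa using hin)
      constructor
      · intro t
        rw [PySem.Set.mem_update, hseen t, pv_mem_orbitA hm haS t]
        constructor
        · rintro (⟨u, hu, hso⟩ | hso)
          · exact ⟨u, by simp [hu], hso⟩
          · exact ⟨a, by simp, hso⟩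
        · rintro ⟨u, hu, hso⟩
          rcases (List.mem_append.1 hu) with h | h
          · exact Or.inl ⟨u, h, hso⟩
          · have : u = a := by simpa using h
            subst this
            exact Or.inr hso
      · rw [hres, hfb, if_neg (fun hc => hncov (hcov.2 hc))]
        simp


-- === generated equivalence of the processed union pairs ===

def pvPairRel (m : Int) (pre : List (Int × Int)) (u v : Int × Int) : Prop :=
  u ∈ pre ∧ v = qa_step u.1 u.2 m

def pvGen (m : Int) (pre : List (Int × Int)) (x y : Int × Int) : Prop :=
  Relation.EqvGen (pvPairRel m pre) x y

lemma pv_eqvGen_pair {α : Type} (r : α → α → Prop) (a b : α) (x y : α) :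
    Relation.EqvGen (fun u v => r u v ∨ (u = a ∧ v = b)) x y ↔
      Relation.EqvGen r x y
      ∨ (Relation.EqvGen r x a ∧ Relation.EqvGen r b y)
      ∨ (Relation.EqvGen r x b ∧ Relation.EqvGen r a y) := by
  constructor
  · intro h
    induction h with
    | rel u v huv =>
      rcases huv with h | ⟨rfl, rfl⟩
      · exact Or.inl (.rel _ _ h)
      · exact Or.inr (Or.inl ⟨.refl _, .refl _⟩)
    | refl u => exact Or.inl (.refl _)
    | symm u v _ ih =>
      rcases ih with h | ⟨h1, h2⟩ | ⟨h1, h2⟩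
      · exact Or.inl (.symm _ _ h)
      · exact Or.inr (Or.inr ⟨.symm _ _ h2, .symm _ _ h1⟩)
      · exact Or.inr (Or.inl ⟨.symm _ _ h2, .symm _ _ h1⟩)
    | trans u v w _ _ ih1 ih2 =>
      rcases ih1 with h1 | ⟨p1, q1⟩ | ⟨p1, q1⟩ <;> rcases ih2 with h2 | ⟨p2, q2⟩ | ⟨p2, q2⟩
      · exact Or.inl (.trans _ _ _ h1 h2)
      · exact Or.inr (Or.inl ⟨.trans _ _ _ h1 p2, q2⟩)
      · exact Or.inr (Or.inr ⟨.trans _ _ _ h1 p2, q2⟩)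
      · exact Or.inr (Or.inl ⟨p1, .trans _ _ _ q1 h2⟩)
      · exact Or.inr (Or.inl ⟨p1, q2⟩)
      · exact Or.inl (.trans _ _ _ p1 q2)
      · exact Or.inr (Or.inr ⟨p1, .trans _ _ _ q1 h2⟩)
      · exact Or.inl (.trans _ _ _ p1 q2)
      · exact Or.inr (Or.inr ⟨p1, q2⟩)
  · intro h
    have base : ∀ u v : α, Relation.EqvGen r u v →
        Relation.EqvGen (fun u v => r u v ∨ (u = a ∧ v = b)) u v :=
      fun _ _ hh => hh.mono (fun u v h => Or.inl h)
    have hab : Relation.EqvGen (fun u v => r u v ∨ (u = a ∧ v = b)) a b :=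
      .rel _ _ (Or.inr ⟨rfl, rfl⟩)
    rcases h with h | ⟨h1, h2⟩ | ⟨h1, h2⟩
    · exact base _ _ h
    · exact .trans _ _ _ (base _ _ h1) (.trans _ _ _ hab (base _ _ h2))
    · exact .trans _ _ _ (base _ _ h1) (.trans _ _ _ (.symm _ _ hab) (base _ _ h2))

lemma pv_pairRel_append (m : Int) (pre : List (Int × Int)) (s u v : Int × Int) :
    pvPairRel m (pre ++ [s]) u v
      ↔ pvPairRel m pre u v ∨ (u = s ∧ v = qa_step s.1 s.2 m) := by
  unfold pvPairRel
  rw [List.mem_append, List.mem_singleton]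
  constructor
  · rintro ⟨h | rfl, rfl⟩
    · exact Or.inl ⟨h, rfl⟩
    · exact Or.inr ⟨rfl, rfl⟩
  · rintro (⟨h, rfl⟩ | ⟨rfl, rfl⟩)
    · exact ⟨Or.inl h, rfl⟩
    · exact ⟨Or.inr rfl, rfl⟩

lemma pv_gen_append (m : Int) (pre : List (Int × Int)) (s x y : Int × Int) :
    pvGen m (pre ++ [s]) x y
      ↔ pvGen m pre x y
        ∨ (pvGen m pre x s ∧ pvGen m pre (qa_step s.1 s.2 m) y)
        ∨ (pvGen m pre x (qa_step s.1 s.2 m) ∧ pvGen m pre s y) := by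
  unfold pvGen
  rw [← pv_eqvGen_pair (pvPairRel m pre) s (qa_step s.1 s.2 m) x y]
  constructor
  · intro h; exact h.mono (fun u v hr => (pv_pairRel_append m pre s u v).1 hr)
  · intro h; exact h.mono (fun u v hr => (pv_pairRel_append m pre s u v).2 hr)

lemma pv_gen_nil (m : Int) (x y : Int × Int) : pvGen m [] x y ↔ x = y := by
  constructor
  · intro h
    induction h with
    | rel u v huv => exact absurd huv.1 (List.not_mem_nil)
    | refl u => rfl
    | symm _ _ _ ih => exact ih.symm
    | trans _ _ _ _ _ ih1 ih2 => exact ih1.trans ih2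
  · rintro rfl; exact .refl _

lemma pv_so_mem_states {m : Int} {s t : Int × Int} (hm : 1 ≤ m) (hs : s ∈ pvStatesB m)
    (h : pvSO m s t) : t ∈ pvStatesB m := by
  obtain ⟨k, rfl⟩ := h
  exact pv_mem_states.2 (pv_traj_inS hm (pv_mem_states.1 hs) k)

lemma pv_gen_states {m : Int} (hm : 1 ≤ m) {x y : Int × Int}
    (hx : x ∈ pvStatesB m) (hy : y ∈ pvStatesB m) :
    pvGen m (pvStatesB m) x y ↔ pvSO m x y := by
  constructor
  · intro h
    have hS : ∀ u v : Int × Int, pvGen m (pvStatesB m) u v →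
        (u = v ∨ (u ∈ pvStatesB m ∧ v ∈ pvStatesB m ∧ pvSO m u v)) := by
      intro u v h
      induction h with
      | rel u v huv =>
        refine Or.inr ⟨huv.1, ?_, ⟨1, huv.2.symm⟩⟩
        rw [huv.2]
        exact pv_mem_states.2 (pv_step_inS hm (pv_mem_states.1 huv.1))
      | refl u => exact Or.inl rfl
      | symm u v _ ih =>
        rcases ih with rfl | ⟨h1, h2, h3⟩
        · exact Or.inl rfl
        · exact Or.inr ⟨h2, h1, pv_so_symm hm (pv_mem_states.1 h1) h3⟩
      | trans u v w _ _ ih1 ih2 =>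
        rcases ih1 with rfl | ⟨h1, h2, h3⟩
        · exact ih2
        · rcases ih2 with rfl | ⟨h4, h5, h6⟩
          · exact Or.inr ⟨h1, h2, h3⟩
          · exact Or.inr ⟨h1, h5, pv_so_trans h3 h6⟩
    rcases hS x y h with rfl | ⟨_, _, h3⟩
    · exact pv_so_refl m x
    · exact h3
  · rintro ⟨k, rfl⟩
    clear hy
    induction k with
    | zero => exact .refl _
    | succ t ih =>
      refine .trans _ _ _ ih (.rel _ _ ⟨?_, rfl⟩)
      exact pv_mem_states.2 (pv_traj_inS hm (pv_mem_states.1 hx) t)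

-- === the state-index encoding used by Source B's arrays ===

def pvIdx (m : Int) (p : Int × Int) : Int := (p.1 - 1) * m + (p.2 - 1)

lemma pv_idx_nonneg {m : Int} {p : Int × Int} (hp : pvInS m p) : 0 ≤ pvIdx m p := by
  obtain ⟨h1, h2, h3, h4⟩ := hp
  have : 0 ≤ (p.1 - 1) * m := mul_nonneg (by omega) (by omega)
  unfold pvIdx
  omega

lemma pv_idx_lt {m : Int} (hm : 1 ≤ m) {p : Int × Int} (hp : pvInS m p) : pvIdx m p < m * m := by
  obtain ⟨h1, h2, h3, h4⟩ := hp
  have h5 : (p.1 - 1) * m ≤ (m - 1) * m := mul_le_mul_of_nonneg_right (by omega) (by omega)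
  unfold pvIdx
  nlinarith

lemma pv_idx_inj {m : Int} (hm : 1 ≤ m) {p q : Int × Int} (hp : pvInS m p) (hq : pvInS m q)
    (h : pvIdx m p = pvIdx m q) : p = q := by
  obtain ⟨pb, pe⟩ := p
  obtain ⟨qb, qe⟩ := q
  obtain ⟨hp1, hp2, hp3, hp4⟩ := hp
  obtain ⟨hq1, hq2, hq3, hq4⟩ := hq
  simp only [pvIdx] at h
  have hdvd : m ∣ qe - pe := ⟨pb - qb, by linarith⟩
  have hz := Int.eq_zero_of_abs_lt_dvd hdvd (by rw [abs_lt]; omega)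
  have hb : pb = qb := by
    have h2 : (pb - 1) * m = (qb - 1) * m := by omega
    have h3 := mul_right_cancel₀ (show m ≠ 0 by omega) h2
    omega
  refine Prod.ext ?_ ?_ <;> simp <;> omega

lemma pv_idx_step (m : Int) (s : Int × Int) :
    (s.2 - 1) * m + PySem.Int.mod (s.1 + s.2 - 1) m = pvIdx m (qa_step s.1 s.2 m) := by
  simp only [pvIdx, qa_step, qa_mod]
  ring

-- element read/write on a Source B array, at in-range Int indices
lemma pv_getD_setD {α : Type} (l : List α) (i t : Int) (x d : α)
    (hi0 : 0 ≤ i) (_hil : i < l.length) (ht0 : 0 ≤ t) (htl : t < l.length) :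
    PySem.List.pyGetD (PySem.List.pySetD l i x) t d = if t = i then x else PySem.List.pyGetD l t d := by
  rw [PySem.List.pySetD_of_nonneg l x hi0,
    PySem.List.pyGetD_eq_getElem _ d ht0 (by rw [List.length_set]; exact htl),
    List.getElem_set, PySem.List.pyGetD_eq_getElem _ d ht0 htl]
  by_cases h : t = i
  · rw [if_pos (by omega), if_pos h]
  · rw [if_neg (by omega), if_neg h]

lemma pv_length_foldl_setD (v : Int) :
    ∀ (ks l : List Int), (ks.foldl (fun l k => PySem.List.pySetD l k v) l).length = l.length := by
  intro ks
  induction ks with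
  | nil => intro l; rfl
  | cons k t ih => intro l; rw [List.foldl_cons, ih, PySem.List.length_pySetD]

lemma pv_getD_foldl_setD (v : Int) :
    ∀ (ks l : List Int) (t : Int), 0 ≤ t → t < l.length → (∀ k ∈ ks, 0 ≤ k ∧ k < l.length) →
    PySem.List.pyGetD (ks.foldl (fun l k => PySem.List.pySetD l k v) l) t 0
      = if t ∈ ks then v else PySem.List.pyGetD l t 0 := by
  intro ks
  induction ks with
  | nil => intro l t _ _ _; simp
  | cons k ks ih =>
    intro l t ht0 htl hks
    rw [List.foldl_cons, ih (PySem.List.pySetD l k v) t ht0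
      (by rw [PySem.List.length_pySetD]; exact htl)
      (fun k' hk' => by rw [PySem.List.length_pySetD]; exact hks k' (by simp [hk']))]
    have hk := hks k (by simp)
    rw [pv_getD_setD l k t v 0 hk.1 hk.2 ht0 htl]
    by_cases hts : t ∈ ks
    · rw [if_pos hts, if_pos (by simp [hts])]
    · rw [if_neg hts]
      by_cases htk : t = k
      · rw [if_pos htk, if_pos (by simp [htk])]
      · rw [if_neg htk, if_neg (by simp [htk, hts])]

lemma pv_mm_len (m : Int) : ((m * m : Int) - 0).toNat = (m * m).toNat := by omega

lemma pv_initLabel_len {m : Int} (hm : 1 ≤ m) : (pvInitLabel m).length = (m * m).toNat := by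
  unfold pvInitLabel
  rw [if_pos (by omega : (0:Int) < m), PySem.List.length_pyRange_one, pv_mm_len]

lemma pv_initMembers_len {m : Int} (hm : 1 ≤ m) : (pvInitMembers m).length = (m * m).toNat := by
  unfold pvInitMembers
  rw [List.length_map, if_pos (by omega : (0:Int) < m), PySem.List.length_pyRange_one, pv_mm_len]

lemma pv_initLabel_get {m t : Int} (hm : 1 ≤ m) (h0 : 0 ≤ t) (h1 : t < m * m) :
    PySem.List.pyGetD (pvInitLabel m) t 0 = t := by
  unfold pvInitLabel
  rw [if_pos (by omega : (0:Int) < m),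
    PySem.List.pyGetD_eq_getElem _ 0 h0
    (by rw [PySem.List.length_pyRange_one]; omega),
    PySem.List.getElem_pyRange_one]
  omega

lemma pv_initMembers_get {m t : Int} (hm : 1 ≤ m) (h0 : 0 ≤ t) (h1 : t < m * m) :
    PySem.List.pyGetD (pvInitMembers m) t [] = [t] := by
  unfold pvInitMembers
  rw [if_pos (by omega : (0:Int) < m),
    PySem.List.pyGetD_eq_getElem _ [] h0
    (by rw [List.length_map, PySem.List.length_pyRange_one]; omega),
    List.getElem_map, PySem.List.getElem_pyRange_one]
  congr 1
  omega

-- the phase-1 invariant: the label/members arrays represent the partition generated so far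
-- (f p is the state whose index is p's current label)
def pvInv1 (m : Int) (pre : List (Int × Int)) (st : List Int × List (List Int)) : Prop :=
  ∃ f : (Int × Int) → (Int × Int),
    st.1.length = (m * m).toNat ∧
    st.2.length = (m * m).toNat ∧
    (∀ p ∈ pvStatesB m, PySem.List.pyGetD st.1 (pvIdx m p) 0 = pvIdx m (f p)) ∧
    (∀ p ∈ pvStatesB m, f p ∈ pvStatesB m) ∧
    (∀ q ∈ pvStatesB m, ∀ k : Int,
      (k ∈ PySem.List.pyGetD st.2 (pvIdx m q) [] ↔ ∃ p ∈ pvStatesB m, k = pvIdx m p ∧ f p = q)) ∧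
    (∀ x ∈ pvStatesB m, ∀ y ∈ pvStatesB m, (f x = f y ↔ pvGen m pre x y))

lemma pv_inv1_init {m : Int} (hm : 1 ≤ m) : pvInv1 m [] (pvInitLabel m, pvInitMembers m) := by
  refine ⟨fun s => s, pv_initLabel_len hm, pv_initMembers_len hm, ?_, fun s hs => hs, ?_, ?_⟩
  · intro p hp
    exact pv_initLabel_get hm (pv_idx_nonneg (pv_states_inS hp).2)
      (pv_idx_lt hm (pv_states_inS hp).2)
  · intro q hq k
    rw [pv_initMembers_get hm (pv_idx_nonneg (pv_states_inS hq).2)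
      (pv_idx_lt hm (pv_states_inS hq).2), List.mem_singleton]
    constructor
    · rintro rfl; exact ⟨q, hq, rfl, rfl⟩
    · rintro ⟨p, _, rfl, rfl⟩; rfl
  · intro x _ y _
    rw [pv_gen_nil]

-- the relabelling of one class onto another
def pvRelabel (f : (Int × Int) → (Int × Int)) (li' lj' : Int × Int) : (Int × Int) → (Int × Int) :=
  fun t => if f t = lj' then li' else f t

lemma pv_relabel_apply (f : (Int × Int) → (Int × Int)) (li' lj' t : Int × Int) :
    pvRelabel f li' lj' t = if f t = lj' then li' else f t := rfl

lemma pv_ite_classes {α : Type} [DecidableEq α] {A B X Y : α} :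
    ((if X = B then A else X) = (if Y = B then A else Y))
      ↔ (X = Y ∨ (X = A ∧ B = Y) ∨ (X = B ∧ A = Y)) := by
  by_cases hx : X = B <;> by_cases hy : Y = B
  · rw [if_pos hx, if_pos hy]
    exact ⟨fun _ => Or.inl (hx.trans hy.symm), fun _ => rfl⟩
  · rw [if_pos hx, if_neg hy]
    constructor
    · intro h; exact Or.inr (Or.inr ⟨hx, h⟩)
    · rintro (h | ⟨h1, h2⟩ | ⟨h1, h2⟩)
      · exact absurd (h.symm.trans hx) hy
      · exact absurd h2.symm hy
      · exact h2
  · rw [if_neg hx, if_pos hy]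
    constructor
    · intro h; exact Or.inr (Or.inl ⟨h, hy.symm⟩)
    · rintro (h | ⟨h1, h2⟩ | ⟨h1, h2⟩)
      · exact absurd (h.trans hy) hx
      · exact h1
      · exact absurd h1 hx
  · rw [if_neg hx, if_neg hy]
    constructor
    · exact Or.inl
    · rintro (h | ⟨h1, h2⟩ | ⟨h1, h2⟩)
      · exact h
      · exact absurd h2.symm hy
      · exact absurd h1 hx

-- the union step preserves the invariant (for either orientation of the weighted link:
-- u is the surviving class representative, v the dissolved one)
lemma pv_inv1_link {m : Int} {pre : List (Int × Int)} {a : Int × Int} (hm : 1 ≤ m)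
    (st : List Int × List (List Int)) (f : (Int × Int) → (Int × Int))
    (hlen1 : st.1.length = (m * m).toNat)
    (hlen2 : st.2.length = (m * m).toNat)
    (hget : ∀ p ∈ pvStatesB m, PySem.List.pyGetD st.1 (pvIdx m p) 0 = pvIdx m (f p))
    (hran : ∀ p ∈ pvStatesB m, f p ∈ pvStatesB m)
    (hmem : ∀ q ∈ pvStatesB m, ∀ k : Int,
      (k ∈ PySem.List.pyGetD st.2 (pvIdx m q) [] ↔ ∃ p ∈ pvStatesB m, k = pvIdx m p ∧ f p = q))
    (hgen : ∀ x ∈ pvStatesB m, ∀ y ∈ pvStatesB m, (f x = f y ↔ pvGen m pre x y))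
    (ha : a ∈ pvStatesB m) (hj : qa_step a.1 a.2 m ∈ pvStatesB m)
    (u v : Int × Int)
    (hor : (u = f a ∧ v = f (qa_step a.1 a.2 m)) ∨ (u = f (qa_step a.1 a.2 m) ∧ v = f a))
    (hne : u ≠ v) :
    pvInv1 m (pre ++ [a])
      ((PySem.List.pyGetD st.2 (pvIdx m v) []).foldl
         (fun l k => PySem.List.pySetD l k (pvIdx m u)) st.1,
       PySem.List.pySetD (PySem.List.pySetD st.2 (pvIdx m u)
         (PySem.List.pyGetD st.2 (pvIdx m u) [] ++ PySem.List.pyGetD st.2 (pvIdx m v) []))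
         (pvIdx m v) []) := by
  have hu : u ∈ pvStatesB m := by
    rcases hor with ⟨h1, _⟩ | ⟨h1, _⟩
    · rw [h1]; exact hran a ha
    · rw [h1]; exact hran _ hj
  have hv : v ∈ pvStatesB m := by
    rcases hor with ⟨_, h2⟩ | ⟨_, h2⟩
    · rw [h2]; exact hran _ hj
    · rw [h2]; exact hran a ha
  have hidx : ∀ p ∈ pvStatesB m, 0 ≤ pvIdx m p ∧ pvIdx m p < m * m := fun p hp =>
    ⟨pv_idx_nonneg (pv_states_inS hp).2, pv_idx_lt hm (pv_states_inS hp).2⟩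
  have hmmcast : ((m * m).toNat : Int) = m * m := by
    have : (0:Int) ≤ m * m := by positivity
    omega
  have hrange1 : ∀ p ∈ pvStatesB m, pvIdx m p < (st.1.length : Int) := by
    intro p hp; rw [hlen1, hmmcast]; exact (hidx p hp).2
  have hrange2 : ∀ p ∈ pvStatesB m, pvIdx m p < (st.2.length : Int) := by
    intro p hp; rw [hlen2, hmmcast]; exact (hidx p hp).2
  have hks : ∀ k ∈ PySem.List.pyGetD st.2 (pvIdx m v) [], 0 ≤ k ∧ k < (st.1.length : Int) := by
    intro k hk
    obtain ⟨p, hp, rfl, _⟩ := (hmem v hv k).1 hk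
    exact ⟨(hidx p hp).1, hrange1 p hp⟩
  have hvne : ∀ p ∈ pvStatesB m, pvIdx m p ∈ PySem.List.pyGetD st.2 (pvIdx m v) [] ↔ f p = v := by
    intro p hp
    rw [hmem v hv]
    constructor
    · rintro ⟨p', hp', heq, hfp'⟩
      rw [pv_idx_inj hm (pv_states_inS hp).2 (pv_states_inS hp').2 heq]
      exact hfp'
    · intro hfp; exact ⟨p, hp, rfl, hfp⟩
  refine ⟨pvRelabel f u v, ?_, ?_, ?_, ?_, ?_, ?_⟩
  · rw [pv_length_foldl_setD, hlen1]
  · rw [PySem.List.length_pySetD, PySem.List.length_pySetD, hlen2]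
  · intro p hp
    rw [pv_getD_foldl_setD _ _ _ _ (hidx p hp).1 (hrange1 p hp) hks, pv_relabel_apply]
    by_cases hfp : f p = v
    · rw [if_pos ((hvne p hp).2 hfp), if_pos hfp]
    · rw [if_neg (fun hc => hfp ((hvne p hp).1 hc)), if_neg hfp]
      exact hget p hp
  · intro p hp
    rw [pv_relabel_apply]
    by_cases hfp : f p = v
    · rw [if_pos hfp]; exact hu
    · rw [if_neg hfp]; exact hran p hp
  · intro q hq k
    rw [pv_getD_setD _ _ _ _ _ (hidx v hv).1
        (by rw [PySem.List.length_pySetD]; exact hrange2 v hv)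
        (hidx q hq).1 (by rw [PySem.List.length_pySetD]; exact hrange2 q hq)]
    by_cases hqv : q = v
    · rw [if_pos (by rw [hqv])]
      simp only [List.not_mem_nil, false_iff]
      rintro ⟨p, hp, rfl, hfp⟩
      rw [pv_relabel_apply] at hfp
      by_cases h2 : f p = v
      · rw [if_pos h2] at hfp; exact hne (hfp.trans hqv)
      · rw [if_neg h2] at hfp; exact h2 (hfp.trans hqv)
    · rw [if_neg (fun hc => hqv (pv_idx_inj hm (pv_states_inS hq).2 (pv_states_inS hv).2 hc))]
      rw [pv_getD_setD _ _ _ _ _ (hidx u hu).1 (hrange2 u hu) (hidx q hq).1 (hrange2 q hq)]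
      by_cases hqu : q = u
      · rw [if_pos (by rw [hqu]), List.mem_append, hmem u hu k, hmem v hv k]
        constructor
        · rintro (⟨p, hp, rfl, hfp⟩ | ⟨p, hp, rfl, hfp⟩)
          · refine ⟨p, hp, rfl, ?_⟩
            rw [pv_relabel_apply, if_neg (by rw [hfp]; exact hne), hfp, hqu]
          · exact ⟨p, hp, rfl, by rw [pv_relabel_apply, if_pos hfp, hqu]⟩
        · rintro ⟨p, hp, rfl, hfp⟩
          rw [pv_relabel_apply] at hfp
          by_cases h2 : f p = v
          · exact Or.inr ⟨p, hp, rfl, h2⟩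
          · rw [if_neg h2] at hfp
            exact Or.inl ⟨p, hp, rfl, hfp.trans hqu⟩
      · rw [if_neg (fun hc => hqu (pv_idx_inj hm (pv_states_inS hq).2 (pv_states_inS hu).2 hc))]
        rw [hmem q hq k]
        constructor
        · rintro ⟨p, hp, rfl, hfp⟩
          refine ⟨p, hp, rfl, ?_⟩
          rw [pv_relabel_apply, if_neg (by rw [hfp]; exact hqv), hfp]
        · rintro ⟨p, hp, rfl, hfp⟩
          rw [pv_relabel_apply] at hfp
          by_cases h2 : f p = v
          · rw [if_pos h2] at hfp; exact absurd hfp.symm hqu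
          · rw [if_neg h2] at hfp; exact ⟨p, hp, rfl, hfp⟩
  · intro x hx y hy
    rw [pv_relabel_apply, pv_relabel_apply, pv_gen_append, ← hgen x hx y hy, ← hgen x hx a ha,
      ← hgen a ha y hy, ← hgen x hx _ hj, ← hgen _ hj y hy, pv_ite_classes]
    rcases hor with ⟨rfl, rfl⟩ | ⟨rfl, rfl⟩
    · exact Iff.rfl
    · tauto

lemma pv_unionStep_eq (m : Int) (st : List Int × List (List Int)) (s : Int × Int) :
    pvUnionStep m st s
      = (if PySem.List.pyGetD st.1 ((s.1 - 1) * m + (s.2 - 1)) 0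
            = PySem.List.pyGetD st.1 ((s.2 - 1) * m + PySem.Int.mod (s.1 + s.2 - 1) m) 0 then st
         else
           let li := PySem.List.pyGetD st.1 ((s.1 - 1) * m + (s.2 - 1)) 0
           let lj := PySem.List.pyGetD st.1 ((s.2 - 1) * m + PySem.Int.mod (s.1 + s.2 - 1) m) 0
           let mi := PySem.List.pyGetD st.2 li []
           let mj := PySem.List.pyGetD st.2 lj []
           if PySem.List.len mi < PySem.List.len mj then
             (mi.foldl (fun l k => PySem.List.pySetD l k lj) st.1,
              PySem.List.pySetD (PySem.List.pySetD st.2 lj (mj ++ mi)) li [])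
           else
             (mj.foldl (fun l k => PySem.List.pySetD l k li) st.1,
              PySem.List.pySetD (PySem.List.pySetD st.2 li (mi ++ mj)) lj [])) := by
  simp only [pvUnionStep]
  by_cases h1 : PySem.List.pyGetD st.1 ((s.1 - 1) * m + (s.2 - 1)) 0
      = PySem.List.pyGetD st.1 ((s.2 - 1) * m + PySem.Int.mod (s.1 + s.2 - 1) m) 0
  · rw [if_pos h1, if_pos h1]
  · rw [if_neg h1, if_neg h1]
    by_cases h2 : PySem.List.len (PySem.List.pyGetD st.2
          (PySem.List.pyGetD st.1 ((s.1 - 1) * m + (s.2 - 1)) 0) [])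
        < PySem.List.len (PySem.List.pyGetD st.2
          (PySem.List.pyGetD st.1 ((s.2 - 1) * m + PySem.Int.mod (s.1 + s.2 - 1) m) 0) [])
    · rw [if_pos h2, if_pos h2]
    · rw [if_neg h2, if_neg h2]

lemma pv_inv1_step {m : Int} (hm : 1 ≤ m) :
    ∀ pre a rest st, pvStatesB m = pre ++ a :: rest → pvInv1 m pre st →
      pvInv1 m (pre ++ [a]) (pvUnionStep m st a) := by
  rintro pre a rest st hfull ⟨f, hlen1, hlen2, hget, hran, hmem, hgen⟩
  have ha : a ∈ pvStatesB m := by rw [hfull]; simp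
  have hj : qa_step a.1 a.2 m ∈ pvStatesB m :=
    pv_mem_states.2 (pv_step_inS hm (pv_mem_states.1 ha))
  have hia : ((a.1 - 1) * m + (a.2 - 1)) = pvIdx m a := rfl
  have hli : PySem.List.pyGetD st.1 ((a.1 - 1) * m + (a.2 - 1)) 0 = pvIdx m (f a) := by
    rw [hia]; exact hget a ha
  have hlj : PySem.List.pyGetD st.1 ((a.2 - 1) * m + PySem.Int.mod (a.1 + a.2 - 1) m) 0
      = pvIdx m (f (qa_step a.1 a.2 m)) := by
    rw [pv_idx_step]; exact hget _ hj
  rw [pv_unionStep_eq, hli, hlj]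
  by_cases heq : f a = f (qa_step a.1 a.2 m)
  · rw [if_pos (by rw [heq])]
    refine ⟨f, hlen1, hlen2, hget, hran, hmem, ?_⟩
    intro x hx y hy
    rw [pv_gen_append]
    have haj : pvGen m pre a (qa_step a.1 a.2 m) := (hgen a ha _ hj).1 heq
    constructor
    · intro h
      exact Or.inl ((hgen x hx y hy).1 h)
    · rintro (h | ⟨h1, h2⟩ | ⟨h1, h2⟩)
      · exact (hgen x hx y hy).2 h
      · exact (hgen x hx y hy).2
          (Relation.EqvGen.trans _ _ _ h1 (Relation.EqvGen.trans _ _ _ haj h2))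
      · exact (hgen x hx y hy).2
          (Relation.EqvGen.trans _ _ _ h1
            (Relation.EqvGen.trans _ _ _ (Relation.EqvGen.symm _ _ haj) h2))
  · have hidxne : ¬ pvIdx m (f a) = pvIdx m (f (qa_step a.1 a.2 m)) := fun hc =>
      heq (pv_idx_inj hm (pv_states_inS (hran a ha)).2 (pv_states_inS (hran _ hj)).2 hc)
    rw [if_neg hidxne]
    by_cases hlen : PySem.List.len (PySem.List.pyGetD st.2 (pvIdx m (f a)) [])
        < PySem.List.len (PySem.List.pyGetD st.2 (pvIdx m (f (qa_step a.1 a.2 m))) [])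
    · rw [if_pos hlen]
      exact pv_inv1_link hm st f hlen1 hlen2 hget hran hmem hgen ha hj _ _
        (Or.inr ⟨rfl, rfl⟩) (fun h => heq h.symm)
    · rw [if_neg hlen]
      exact pv_inv1_link hm st f hlen1 hlen2 hget hran hmem hgen ha hj _ _
        (Or.inl ⟨rfl, rfl⟩) heq

-- the final label classifies exactly the orbits
lemma pv_key_spec {m : Int} (hm : 1 ≤ m) :
    ∃ f : (Int × Int) → (Int × Int),
      (∀ p ∈ pvStatesB m, PySem.List.pyGetD (pvPhase1 m).1 (pvIdx m p) 0 = pvIdx m (f p)) ∧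
      (∀ p ∈ pvStatesB m, f p ∈ pvStatesB m) ∧
      (∀ x ∈ pvStatesB m, ∀ y ∈ pvStatesB m, (f x = f y ↔ pvSO m x y)) := by
  have hinv : pvInv1 m (pvStatesB m) (pvPhase1 m) := by
    unfold pvPhase1
    exact pv_foldl_pre _ _ _ (pv_inv1_step hm) (pvStatesB m) [] _ rfl (pv_inv1_init hm)
  obtain ⟨f, _, _, h1, h2, _, h4⟩ := hinv
  exact ⟨f, h1, h2, fun x hx y hy => (h4 x hx y hy).trans (pv_gen_states hm hx hy)⟩

-- Source B's final label lookup
def pvKeyB (m : Int) (s : Int × Int) : Int :=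
  PySem.List.pyGetD (pvPhase1 m).1 (pvIdx m s) 0

def pvEntryB (m : Int) (g : List (Int × Int)) : List (String × Int) :=
  [("length", PySem.List.len g),
   ("distinct_multisets",
    PySem.Set.len (PySem.Set.ofList (g.map (fun p => pvSortedEdge p.1 p.2 m))))]

lemma pv_edgefold_eq (m : Int) (l : List (Int × Int)) :
    l.foldl (fun es p => PySem.Set.add es (pvSortedEdge p.1 p.2 m)) PySem.Set.empty
      = PySem.Set.ofList (l.map (fun p => pvSortedEdge p.1 p.2 m)) := by
  have h := PySem.Set.update_map_eq_foldl_add l (fun p => pvSortedEdge p.1 p.2 m) PySem.Set.empty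
  rw [PySem.Set.update_empty] at h
  exact h.symm

lemma pv_groups_getD (m : Int) (c : Int) :
    (pvGroups m).getD c [] = (pvStatesB m).filter (fun s => pvKeyB m s == c) := by
  unfold pvGroups
  have hmap : ((pvStatesB m).foldl
        (fun g s => g.modify (PySem.List.pyGetD (pvPhase1 m).1 ((s.1 - 1) * m + (s.2 - 1)) 0) [] (· ++ [s]))
        PySem.Dict.empty)
      = (((pvStatesB m).map (fun t => (pvKeyB m t, t))).foldl
        (fun g p => g.modify p.1 [] (· ++ [p.2])) PySem.Dict.empty) :=
    (List.foldl_map (f := fun t => (pvKeyB m t, t))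
      (g := fun (g : PySem.Dict Int (List (Int × Int))) p => g.modify p.1 [] (· ++ [p.2]))
      (l := pvStatesB m) (init := PySem.Dict.empty)).symm
  rw [hmap, PySem.Dict.getD_foldl_modify_append, PySem.Dict.getD_empty, List.filter_map,
    List.map_map]
  simp only [Function.comp_def]
  simp

lemma pv_groups_values (m : Int) :
    (pvGroups m).values
      = (PySem.Set.ofList ((pvStatesB m).map (pvKeyB m))).map
          (fun c => (pvStatesB m).filter (fun s => pvKeyB m s == c)) := by
  have hkeys : (pvGroups m).keys = PySem.Set.ofList ((pvStatesB m).map (pvKeyB m)) := by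
    unfold pvGroups
    have h := PySem.Dict.keys_foldl_modify_key (pvStatesB m) (pvKeyB m)
      ([] : List (Int × Int)) (fun (_ : PySem.Dict Int (List (Int × Int))) x => (· ++ [x]))
      PySem.Dict.empty
    rw [PySem.Dict.keys_empty, PySem.Set.update_nil_left] at h
    exact h
  have hnd : (pvGroups m).keys.Nodup := by
    rw [hkeys]; exact PySem.Set.nodup_ofList _
  have hval : (pvGroups m).values = (pvGroups m).items.map (fun p => p.2) := rfl
  rw [hval, PySem.Dict.items_eq_map_keys _ hnd [], List.map_map, hkeys]
  exact List.map_congr_left (fun c _ => pv_groups_getD m c)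

lemma pv_B_eq (m : Int) :
    compute_orbit_multiset_stats_alt m
      = (PySem.Set.ofList ((pvStatesB m).map (pvKeyB m))).map
          (fun c => pvEntryB m ((pvStatesB m).filter (fun s => pvKeyB m s == c))) := by
  unfold compute_orbit_multiset_stats_alt
  rw [pv_groups_values]
  rw [show (fun (res : List (List (String × Int))) (g : List (Int × Int)) =>
        let edges := g.foldl (fun es p =>
          PySem.Set.add es (PySem.List.sorted
            [p.1, p.2, PySem.Int.mod (p.1 + p.2 - 1) m + 1, PySem.Int.mod (p.1 + 2 * p.2 - 1) m + 1]
            (fun x => x) false)) PySem.Set.empty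
        res ++ [[("length", PySem.List.len g), ("distinct_multisets", PySem.Set.len edges)]])
      = (fun res g => res ++ [(fun g => [("length", PySem.List.len g),
          ("distinct_multisets", PySem.Set.len (g.foldl (fun es p =>
            PySem.Set.add es (pvSortedEdge p.1 p.2 m)) PySem.Set.empty))]) g]) from rfl]
  rw [PySem.List.foldl_append_singleton_eq_map, List.nil_append, List.map_map]
  refine List.map_congr_left (fun c _ => ?_)
  simp only [Function.comp]
  unfold pvEntryB
  rw [pv_edgefold_eq]

-- distinct keys in scan order are the keys of the first-appearance representatives
lemma pv_ofList_firsts (key : (Int × Int) → Int) :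
    ∀ (l : List (Int × Int)) (S seen : List Int), (∀ c, c ∈ S ↔ c ∈ seen) →
      PySem.Set.update S (l.map key) = S ++ (pvFirstsBy key seen l).map key := by
  intro l
  induction l with
  | nil => intro S seen _; simp [pvFirstsBy, PySem.Set.update_nil]
  | cons x xs ih =>
    intro S seen hS
    rw [List.map_cons, PySem.Set.update_cons]
    by_cases h : key x ∈ seen
    · rw [PySem.Set.add_of_mem ((hS _).2 h)]
      rw [pvFirstsBy, if_pos h]
      exact ih S (seen ++ [key x]) (fun c => by
        rw [hS c]
        constructor
        · intro hc; exact List.mem_append.2 (Or.inl hc)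
        · intro hc
          rcases List.mem_append.1 hc with hc | hc
          · exact hc
          · rw [List.mem_singleton] at hc; rw [hc]; exact h)
    · rw [PySem.Set.add_of_not_mem (fun hc => h ((hS _).1 hc))]
      rw [pvFirstsBy, if_neg h]
      rw [ih (S ++ [key x]) (seen ++ [key x]) (fun c => by
        rw [List.mem_append, List.mem_append, hS c])]
      simp

lemma pv_firstsBy_subset (key : (Int × Int) → Int) :
    ∀ (l : List (Int × Int)) (seen : List Int) (x : Int × Int), x ∈ pvFirstsBy key seen l → x ∈ l := by
  intro l
  induction l with
  | nil => intro seen x h; exact absurd h (List.not_mem_nil)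
  | cons a t ih =>
    intro seen x h
    rw [pvFirstsBy] at h
    by_cases ha : key a ∈ seen
    · rw [if_pos ha] at h
      exact List.mem_cons_of_mem a (ih _ x h)
    · rw [if_neg ha] at h
      rcases List.mem_cons.1 h with rfl | h
      · exact List.mem_cons_self
      · exact List.mem_cons_of_mem a (ih _ x h)

lemma pv_ofList_len_of_perm {l1 l2 : List (List Int)} (h : l1.Perm l2) :
    PySem.Set.len (PySem.Set.ofList l1) = PySem.Set.len (PySem.Set.ofList l2) := by
  have : (PySem.Set.ofList l1).Perm (PySem.Set.ofList l2) :=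
    (List.perm_ext_iff_of_nodup (PySem.Set.nodup_ofList _) (PySem.Set.nodup_ofList _)).2
      (fun a => by rw [PySem.Set.mem_ofList, PySem.Set.mem_ofList, h.mem_iff])
  simp [PySem.Set.len, this.length_eq]

-- ===== VERDICT (by name: the statement is the Claim_ definition above) =====
theorem compute_orbit_multiset_stats_spec : Claim_equal_compute_orbit_multiset_stats := by
  intro m _
  unfold Spec_compute_orbit_multiset_stats
  by_cases hm : 1 ≤ m
  · obtain ⟨f, hget, hran, hiff⟩ := pv_key_spec hm
    have hkeyf : ∀ s ∈ pvStatesB m, pvKeyB m s = pvIdx m (f s) := by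
      intro s hs
      unfold pvKeyB
      exact hget s hs
    have hkey : ∀ x ∈ pvStatesB m, ∀ y ∈ pvStatesB m, (pvKeyB m x = pvKeyB m y ↔ pvSO m x y) := by
      intro x hx y hy
      rw [hkeyf x hx, hkeyf y hy, ← hiff x hx y hy]
      constructor
      · intro h
        exact pv_idx_inj hm (pv_states_inS (hran x hx)).2 (pv_states_inS (hran y hy)).2 h
      · intro h; rw [h]
    rw [pv_A_eq hm (pvKeyB m) hkey, pv_B_eq m]
    have hL1 := pv_ofList_firsts (pvKeyB m) (pvStatesB m) [] [] (by simp)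
    rw [List.nil_append] at hL1
    rw [show PySem.Set.ofList ((pvStatesB m).map (pvKeyB m))
        = PySem.Set.update [] ((pvStatesB m).map (pvKeyB m)) from
        (PySem.Set.update_nil_left _).symm, hL1, List.map_map]
    refine List.map_congr_left (fun s0 hs0 => ?_)
    have hs0m : s0 ∈ pvStatesB m := pv_firstsBy_subset (pvKeyB m) _ _ s0 hs0
    have hs0S := pv_mem_states.1 hs0m
    simp only [Function.comp_def]
    have hgmem : ∀ t, t ∈ (pvStatesB m).filter (fun s => pvKeyB m s == pvKeyB m s0)
        ↔ t ∈ pvOrbitA m s0 := by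
      intro t
      rw [List.mem_filter, beq_iff_eq, pv_mem_orbitA hm hs0S]
      constructor
      · rintro ⟨ht, hk⟩
        exact pv_so_symm hm (pv_mem_states.1 ht) ((hkey t ht s0 hs0m).1 hk)
      · intro hso
        have ht : t ∈ pvStatesB m := pv_so_mem_states hm hs0m hso
        exact ⟨ht, (hkey t ht s0 hs0m).2 (pv_so_symm hm hs0S hso)⟩
    have hperm : ((pvStatesB m).filter (fun s => pvKeyB m s == pvKeyB m s0)).Perm (pvOrbitA m s0) :=
      (List.perm_ext_iff_of_nodup ((pv_states_nodup m).filter _)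
        (pv_orbitA_nodup hm hs0S)).2 hgmem
    unfold pvEntryA pvEntryB
    rw [pv_edgefold_eq, PySem.List.len_eq, hperm.length_eq,
      pv_ofList_len_of_perm (hperm.map (fun p => pvSortedEdge p.1 p.2 m))]
  · have hS : pvStatesB m = [] := by
      unfold pvStatesB
      rw [PySem.List.pyRange_one_eq_nil (by omega)]
      rfl
    unfold compute_orbit_multiset_stats compute_orbit_multiset_stats_alt pvGroups
    rw [pv_states_eq, hS]
    rfl
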